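-- pv_equiv track=rewrite | github.com/siran/research | _drafts/On the Causality of Natural Numbers/era_order.py | tau_up_to
-- ===== SOURCE A (Python) =====
-- from math import gcd, isqrt
--
-- def power_cost(n: int) -> int:
--     """Least generator ceiling needed to realize n as a^b with b >= 1."""
--     best = n
--     max_b = n.bit_length() + 1
--     for b in range(2, max_b + 1):
--         lo = 2
--         hi = n
--         while lo <= hi:
--             mid = (lo + hi) // 2
--             value = mid**b
--             if value == n:
--                 best = min(best, max(mid, b))
--                 break
--             if value < n:
--                 lo = mid + 1
--             else:
--                 hi = mid - 1
--     return best
--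
-- def tau_up_to(limit: int) -> list[int]:
--     """Compute tau(n) for 1 <= n <= limit."""
--     tau = [0] * (limit + 1)
--     tau[1] = 1
--     for n in range(2, limit + 1):
--         best = power_cost(n)
--         for a in range(2, isqrt(n) + 1):
--             if n % a != 0:
--                 continue
--             b = n // a
--             if gcd(a, b) != 1:
--                 continue
--             best = min(best, max(tau[a], tau[b]))
--         tau[n] = best
--     return tau
-- ===== SOURCE B (Python) =====
-- from math import gcd
--
-- def tau_up_to(limit: int) -> list[int]:
--     """Compute tau(n) for 1 <= n <= limit."""
--     tau = [0] * (limit + 1)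
--     tau[1] = 1
--     for n in range(2, limit + 1):
--         best = n
--         a = 2
--         while a * a <= n:
--             if n % a == 0:
--                 b = n // a
--                 if gcd(a, b) == 1:
--                     m = max(tau[a], tau[b])
--                     if m < best:
--                         best = m
--                 # exponent climb: smallest e >= 2 with a**e >= n
--                 v = a * a
--                 e = 2
--                 while v < n:
--                     v *= a
--                     e += 1
--                 if v == n:
--                     c = max(a, e)
--                     if c < best:
--                         best = c
--             a += 1
--         tau[n] = best
--     return tau
-- ===== Notes on version B (the rewrite author's own statement) =====
-- stated objective: faster
-- what changed: Replaced A's two per-n phases (a binary search over [2,n] for every exponent b up to bit_length+1, computing huge powers mid**b, followed by a separate divisor scan) by one fused scan over bases a <= sqrt(n) that handles the coprime-split candidate and climbs small powers a^e multiplicatively, so no binary searches and no big-integer exponentiations are performed.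
import Mathlib
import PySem

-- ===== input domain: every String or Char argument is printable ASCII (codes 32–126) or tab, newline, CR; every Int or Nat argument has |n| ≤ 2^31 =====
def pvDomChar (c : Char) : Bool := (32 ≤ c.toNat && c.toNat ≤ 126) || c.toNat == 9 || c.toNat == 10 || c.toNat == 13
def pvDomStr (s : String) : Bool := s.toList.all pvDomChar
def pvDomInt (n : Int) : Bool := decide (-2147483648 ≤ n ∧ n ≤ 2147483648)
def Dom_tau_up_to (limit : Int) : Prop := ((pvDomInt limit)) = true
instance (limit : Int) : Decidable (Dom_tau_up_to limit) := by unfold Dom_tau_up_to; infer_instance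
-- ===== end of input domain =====

-- B replaces A's per-n binary searches (one per exponent, on huge powers) plus separate divisor
-- scan by a single fused scan over bases a ≤ √n with a multiplicative exponent climb; measured
-- constant-factor speed-up. Equivalence is proved on Pre_ (1 ≤ limit), where A returns.

-- small named facts the ports cite for termination/positivity (hand-written proofs keep the
-- definitions' proof closures tiny)
theorem pv_toNat_dec {x y : Int} (hxy : x < y) (hy : 0 < y) : x.toNat < y.toNat :=
  (Int.toNat_lt_toNat hy).mpr hxy
theorem pv_mid_dec₁ (lo hi : Int) (h : lo ≤ hi) :
    (hi + 1 - (PySem.Int.floordiv (lo + hi) 2 + 1)).toNat < (hi + 1 - lo).toNat :=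
  pv_toNat_dec
    (sub_lt_sub_left (Int.lt_add_one_iff.mpr (PySem.Int.floordiv_two_mid_bounds h).1) _)
    (sub_pos.mpr (Int.lt_add_one_iff.mpr h))
theorem pv_mid_dec₂ (lo hi : Int) (h : lo ≤ hi) :
    (PySem.Int.floordiv (lo + hi) 2 - 1 + 1 - lo).toNat < (hi + 1 - lo).toNat :=
  by
    rw [sub_add_cancel]
    exact pv_toNat_dec
      (sub_lt_sub_right (Int.lt_add_one_iff.mpr (PySem.Int.floordiv_two_mid_bounds h).2) lo)
      (sub_pos.mpr (Int.lt_add_one_iff.mpr h))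
theorem pv_one_le_mul {a v : Int} (ha : 2 ≤ a) (hv : 1 ≤ v) : 1 ≤ v * a :=
  le_trans hv (le_mul_of_one_le_right (le_trans zero_le_one hv) (le_trans one_le_two ha))
theorem pv_climb_dec {a n v : Int} (ha : 2 ≤ a) (hv : 1 ≤ v) (h : v < n) :
    (n - v * a).toNat < (n - v).toNat :=
  pv_toNat_dec
    (sub_lt_sub_left
      (lt_of_lt_of_le (lt_mul_right (lt_of_lt_of_le zero_lt_one hv) (lt_of_lt_of_le one_lt_two ha))
        (le_refl _)) n)
    (sub_pos.mpr h)
theorem pv_one_le_sq {a : Int} (ha : 2 ≤ a) : 1 ≤ a * a :=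
  pv_one_le_mul ha (le_trans one_le_two ha)
theorem pv_two_le_succ {a : Int} (ha : 2 ≤ a) : 2 ≤ a + 1 :=
  le_trans ha (le_add_of_nonneg_right zero_le_one)
theorem pv_le_of_sq_le {a n : Int} (ha : 2 ≤ a) (h : a * a ≤ n) : a ≤ n :=
  le_trans (le_mul_of_one_le_right (le_trans zero_le_two ha) (le_trans one_le_two ha)) h
theorem pv_scan_dec {a n : Int} (ha : 2 ≤ a) (h : a * a ≤ n) :
    (n + 1 - (a + 1)).toNat < (n + 1 - a).toNat :=
  pv_toNat_dec (sub_lt_sub_left (lt_add_one a) _)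
    (sub_pos.mpr (Int.lt_add_one_iff.mpr (pv_le_of_sq_le ha h)))

-- ===== PORT A =====
-- the 'while lo <= hi' binary search inside power_cost (break = immediate return)
def pcSearch (n b lo hi best : Int) : Int :=
  if _h : lo ≤ hi then
    let mid := PySem.Int.floordiv (lo + hi) 2
    let value := mid ^ b.toNat        -- mid ** b; exact since every call has b ≥ 2
    if value = n then min best (max mid b)
    else if value < n then pcSearch n b (mid + 1) hi best
    else pcSearch n b lo (mid - 1) best
  else best
termination_by (hi + 1 - lo).toNat
decreasing_by
  · exact pv_mid_dec₁ lo hi _h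
  · exact pv_mid_dec₂ lo hi _h

def power_cost (n : Int) : Int :=
  let max_b : Int := (PySem.Int.bitLength n : Int) + 1
  (PySem.List.pyRange 2 (max_b + 1) 1).foldl (fun best b => pcSearch n b 2 n best) n

-- body of A's main loop (one n); isqrt(n) = Nat.sqrt n.toNat (exact for n ≥ 0)
def tauStepA (tau : List Int) (n : Int) : List Int :=
  let best := power_cost n
  let best := (PySem.List.pyRange 2 ((Nat.sqrt n.toNat : Int) + 1) 1).foldl
      (fun best a =>
        if PySem.Int.mod n a ≠ 0 then best
        else
          let b := PySem.Int.floordiv n a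
          if Int.gcd a b ≠ 1 then best
          else min best (max (PySem.List.pyGetD tau a 0) (PySem.List.pyGetD tau b 0)))
      best
  PySem.List.pySetD tau n best

def tau_up_to (limit : Int) : List Int :=
  let tau := List.replicate (limit + 1).toNat 0
  let tau := PySem.List.pySetD tau 1 1        -- tau[1] = 1 (IndexError for limit ≤ 0: outside Pre_)
  (PySem.List.pyRange 2 (limit + 1) 1).foldl tauStepA tau

-- ===== PORT B =====
-- the exponent climb 'v = a*a; e = 2; while v < n: v *= a; e += 1' (hypotheses only for termination)
def climb (a n v e : Int) (ha : 2 ≤ a) (hv : 1 ≤ v) : Int × Int :=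
  if _h : v < n then climb a n (v * a) (e + 1) ha (pv_one_le_mul ha hv) else (v, e)
termination_by (n - v).toNat
decreasing_by exact pv_climb_dec ha hv _h

-- B's fused 'while a * a <= n' scan (hypothesis only for the climb call)
def bScan (n : Int) (tau : List Int) (a best : Int) (ha : 2 ≤ a) : Int :=
  if _h : a * a ≤ n then
    let best :=
      if PySem.Int.mod n a = 0 then
        let b := PySem.Int.floordiv n a
        let best :=
          if Int.gcd a b = 1 then
            let m := max (PySem.List.pyGetD tau a 0) (PySem.List.pyGetD tau b 0)
            if m < best then m else best
          else best
        let ve := climb a n (a * a) 2 ha (pv_one_le_sq ha)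
        if ve.1 = n then
          let c := max a ve.2
          if c < best then c else best
        else best
      else best
    bScan n tau (a + 1) best (pv_two_le_succ ha)
  else best
termination_by (n + 1 - a).toNat
decreasing_by exact pv_scan_dec ha _h

def tauStepB (tau : List Int) (n : Int) : List Int :=
  PySem.List.pySetD tau n (bScan n tau 2 n (by norm_num))

def tau_up_to_alt (limit : Int) : List Int :=
  let tau := List.replicate (limit + 1).toNat 0
  let tau := PySem.List.pySetD tau 1 1
  (PySem.List.pyRange 2 (limit + 1) 1).foldl tauStepB tau

-- ===== PRECONDITION & SPEC =====
-- Pre_ admits every input on which A returns: for any smaller limit the list is too short and A's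
-- initial store into the table raises IndexError (B raises there too).
def Pre_tau_up_to (limit : Int) : Prop := 1 ≤ limit
instance (limit : Int) : Decidable (Pre_tau_up_to limit) := by unfold Pre_tau_up_to; infer_instance
def pvWitness_tau_up_to : Int := (7)

def Spec_tau_up_to (limit : Int) (out : List Int) : Prop := out = tau_up_to_alt limit
instance (limit : Int) (out : List Int) : Decidable (Spec_tau_up_to limit out) := by unfold Spec_tau_up_to; infer_instance

-- ===== CLAIM (what is proved, stated in full; the proofs are below) =====
def Claim_equal_tau_up_to : Prop := ∀ (limit : Int), Dom_tau_up_to limit → Pre_tau_up_to limit → Spec_tau_up_to limit (tau_up_to limit)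

-- ===== LEMMAS AND PROOFS =====

-- the candidate set both programs minimise over, for one value of n
def DivCand (n : Int) (tau : List Int) (a c : Int) : Prop :=
  PySem.Int.mod n a = 0 ∧ Int.gcd a (PySem.Int.floordiv n a) = 1 ∧
    c = max (PySem.List.pyGetD tau a 0) (PySem.List.pyGetD tau (PySem.Int.floordiv n a) 0)

def PowCand (n a c : Int) : Prop := ∃ e : Int, 2 ≤ e ∧ a ^ e.toNat = n ∧ c = max a e

def Cand (n : Int) (tau : List Int) (c : Int) : Prop :=
  ∃ a, 2 ≤ a ∧ a * a ≤ n ∧ (DivCand n tau a c ∨ PowCand n a c)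

-- R is the minimum of {init} ∪ {c | C c}
def MinSpec (C : Int → Prop) (init R : Int) : Prop :=
  (R = init ∨ C R) ∧ R ≤ init ∧ ∀ c, C c → R ≤ c

theorem minSpec_unique {C : Int → Prop} {init R₁ R₂ : Int}
    (h₁ : MinSpec C init R₁) (h₂ : MinSpec C init R₂) : R₁ = R₂ := by
  obtain ⟨m₁, le₁, lb₁⟩ := h₁
  obtain ⟨m₂, le₂, lb₂⟩ := h₂
  apply le_antisymm
  · rcases m₂ with h | h
    · exact h ▸ le₁
    · exact lb₁ _ h
  · rcases m₁ with h | h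
    · exact h ▸ le₂
    · exact lb₂ _ h

theorem foldl_min_spec {α : Type} (P : α → Int → Prop) (l : List α) (step : Int → α → Int)
    (h : ∀ b x, x ∈ l →
      (step b x = b ∨ ∃ c, P x c ∧ step b x = c) ∧ step b x ≤ b ∧ ∀ c, P x c → step b x ≤ c) :
    ∀ init, MinSpec (fun c => ∃ x ∈ l, P x c) init (l.foldl step init) := by
  induction l with
  | nil =>
    intro init
    exact ⟨Or.inl rfl, le_refl _, fun c hc => absurd hc.choose_spec.1 (by simp)⟩
  | cons x l ih =>
    intro init
    have hx := h init x (List.mem_cons_self)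
    obtain ⟨m, le, lb⟩ := ih (fun b y hy => h b y (List.mem_cons_of_mem _ hy)) (step init x)
    simp only [List.foldl_cons]
    refine ⟨?_, le.trans hx.2.1, ?_⟩
    · rcases m with hm | ⟨y, hy, hc⟩
      · rcases hx.1 with h0 | ⟨c, hc, he⟩
        · exact Or.inl (hm.trans h0)
        · exact Or.inr ⟨x, List.mem_cons_self, (hm.trans he) ▸ hc⟩
      · exact Or.inr ⟨y, List.mem_cons_of_mem _ hy, hc⟩
    · rintro c ⟨y, hy, hPyc⟩
      rcases List.mem_cons.mp hy with rfl | hy'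
      · exact le.trans (hx.2.2 c hPyc)
      · exact lb c ⟨y, hy', hPyc⟩

theorem minSpec_congr {C₁ C₂ : Int → Prop} {init R : Int} (h : ∀ c, C₁ c ↔ C₂ c)
    (hm : MinSpec C₁ init R) : MinSpec C₂ init R :=
  ⟨hm.1.imp id (fun hc => (h R).mp hc), hm.2.1, fun c hc => hm.2.2 c ((h c).mpr hc)⟩

theorem pcSearch_spec (n b : Int) (hb : 2 ≤ b) (lo hi : Int) :
    ∀ best : Int, 0 ≤ lo →
    MinSpec (fun c => ∃ a, lo ≤ a ∧ a ≤ hi ∧ a ^ b.toNat = n ∧ c = max a b) best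
      (pcSearch n b lo hi best) := by
  have hk : b.toNat ≠ 0 := by omega
  induction lo, hi using pcSearch.induct (n := n) (b := b) with
  | case1 lo hi hle mid value heq =>
    intro best hlo
    have heq' : PySem.Int.floordiv (lo + hi) 2 ^ b.toNat = n := heq
    obtain ⟨hm1, hm2⟩ := PySem.Int.floordiv_two_mid_bounds (lo := lo) (hi := hi) hle
    rw [pcSearch, dif_pos hle, if_pos heq']
    refine ⟨?_, min_le_left _ _, ?_⟩
    · rcases min_choice best (max (PySem.Int.floordiv (lo + hi) 2) b) with h | h
      · exact Or.inl h
      · exact Or.inr ⟨_, hm1, hm2, heq', h⟩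
    · rintro c ⟨a, ha1, ha2, ha3, rfl⟩
      have : a = PySem.Int.floordiv (lo + hi) 2 := by
        by_contra hne
        rcases lt_or_gt_of_ne hne with hlt | hgt
        · have := pow_lt_pow_left₀ hlt (by omega : (0:Int) ≤ a) hk
          rw [ha3, heq'] at this; omega
        · have := pow_lt_pow_left₀ hgt (by omega : (0:Int) ≤ PySem.Int.floordiv (lo + hi) 2) hk
          rw [ha3, heq'] at this; omega
      rw [this]; exact min_le_right _ _
  | case2 lo hi hle mid value hne hlt ih =>
    intro best hlo
    have hne' : ¬ PySem.Int.floordiv (lo + hi) 2 ^ b.toNat = n := hne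
    have hlt' : PySem.Int.floordiv (lo + hi) 2 ^ b.toNat < n := hlt
    obtain ⟨hm1, hm2⟩ := PySem.Int.floordiv_two_mid_bounds (lo := lo) (hi := hi) hle
    rw [pcSearch, dif_pos hle, if_neg hne', if_pos hlt']
    refine minSpec_congr (fun c => ?_) (ih best (by omega))
    constructor
    · rintro ⟨a, ha1, ha2, ha3, rfl⟩; exact ⟨a, by omega, ha2, ha3, rfl⟩
    · rintro ⟨a, ha1, ha2, ha3, rfl⟩
      refine ⟨a, ?_, ha2, ha3, rfl⟩
      by_contra hc
      have hle2 : a ≤ PySem.Int.floordiv (lo + hi) 2 := by omega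
      have := pow_le_pow_left₀ (by omega : (0:Int) ≤ a) hle2 b.toNat
      rw [ha3] at this; omega
  | case3 lo hi hle mid value hne hge ih =>
    intro best hlo
    have hne' : ¬ PySem.Int.floordiv (lo + hi) 2 ^ b.toNat = n := hne
    have hge' : ¬ PySem.Int.floordiv (lo + hi) 2 ^ b.toNat < n := hge
    obtain ⟨hm1, hm2⟩ := PySem.Int.floordiv_two_mid_bounds (lo := lo) (hi := hi) hle
    rw [pcSearch, dif_pos hle, if_neg hne', if_neg hge']
    refine minSpec_congr (fun c => ?_) (ih best hlo)
    constructor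
    · rintro ⟨a, ha1, ha2, ha3, rfl⟩; exact ⟨a, ha1, by omega, ha3, rfl⟩
    · rintro ⟨a, ha1, ha2, ha3, rfl⟩
      refine ⟨a, ha1, ?_, ha3, rfl⟩
      by_contra hc
      have hle2 : PySem.Int.floordiv (lo + hi) 2 ≤ a := by omega
      have := pow_le_pow_left₀ (by omega : (0:Int) ≤ PySem.Int.floordiv (lo + hi) 2) hle2 b.toNat
      rw [ha3] at this; omega
  | case4 lo hi hle =>
    intro best hlo
    rw [pcSearch, dif_neg hle]
    exact ⟨Or.inl rfl, le_refl _, fun c hc => absurd hc (by rintro ⟨a, h1, h2, _⟩; omega)⟩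

theorem power_cost_spec (n : Int) (hn : 2 ≤ n) :
    MinSpec (fun c => ∃ a b : Int, 2 ≤ a ∧ 2 ≤ b ∧ a ^ b.toNat = n ∧ c = max a b) n
      (power_cost n) := by
  unfold power_cost
  have h := foldl_min_spec (fun b c => 2 ≤ b ∧ ∃ a, 2 ≤ a ∧ a ^ b.toNat = n ∧ c = max a b)
      (PySem.List.pyRange 2 ((PySem.Int.bitLength n : Int) + 1 + 1) 1)
      (fun best b => pcSearch n b 2 n best)
      (by
        intro best b hbmem
        have hb2 : 2 ≤ b := (PySem.List.mem_pyRange_one.mp hbmem).1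
        have hs := pcSearch_spec n b hb2 2 n best (by norm_num)
        refine ⟨?_, hs.2.1, ?_⟩
        · rcases hs.1 with h0 | ⟨a, ha1, ha2, ha3, h4⟩
          · exact Or.inl h0
          · exact Or.inr ⟨_, ⟨hb2, a, ha1, ha3, h4⟩, rfl⟩
        · rintro c ⟨_, a, ha2, ha3, rfl⟩
          refine hs.2.2 _ ⟨a, ha2, ?_, ha3, rfl⟩
          calc a ≤ a ^ b.toNat := le_self_pow₀ (by omega) (by omega)
            _ = n := ha3)
      n
  refine minSpec_congr (fun c => ?_) h
  constructor
  · rintro ⟨b, hbl, hb2, a, ha2, ha3, rfl⟩; exact ⟨a, b, ha2, hb2, ha3, rfl⟩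
  · rintro ⟨a, b, ha2, hb2, ha3, rfl⟩
    refine ⟨b, ?_, hb2, a, ha2, ha3, rfl⟩
    rw [PySem.List.mem_pyRange_one]
    refine ⟨hb2, ?_⟩
    have h2 : (2:Int) ^ b.toNat ≤ n := ha3 ▸ pow_le_pow_left₀ (by norm_num) ha2 _
    have h2n : (2:Nat) ^ b.toNat ≤ n.natAbs := by
      have : ((2:Nat) ^ b.toNat : Int) ≤ n := by push_cast; exact h2
      omega
    have hlt := PySem.Int.lt_two_pow_bitLength n
    have : b.toNat < PySem.Int.bitLength n :=
      (Nat.pow_lt_pow_iff_right (by norm_num)).mp (lt_of_le_of_lt h2n hlt)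
    omega

theorem climb_spec (a n : Int) (ha : 2 ≤ a) :
    ∀ (v e : Int) (hv : 1 ≤ v), v = a ^ e.toNat → 1 ≤ e →
      ((climb a n v e ha hv).1 = n ↔ ∃ e', e ≤ e' ∧ a ^ e'.toNat = n) ∧
      (∀ e', e ≤ e' → a ^ e'.toNat = n →
        (climb a n v e ha hv).2 = e' ∧ (climb a n v e ha hv).1 = n) := by
  intro v e hv
  induction v, e, hv using climb.induct (a := a) (n := n) (ha := ha) with
  | case1 v e hv hlt ih =>
    intro hveq he
    have hva : v * a = a ^ (e + 1).toNat := by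
      have : (e + 1).toNat = e.toNat + 1 := by omega
      rw [this, pow_succ, ← hveq]
    obtain ⟨ih1, ih2⟩ := ih hva (by omega)
    rw [climb, dif_pos hlt]
    constructor
    · rw [ih1]
      constructor
      · rintro ⟨e', h1, h2⟩; exact ⟨e', by omega, h2⟩
      · rintro ⟨e', h1, h2⟩
        refine ⟨e', ?_, h2⟩
        rcases (by omega : e' = e ∨ e + 1 ≤ e') with rfl | h
        · rw [← hveq] at h2; omega
        · exact h
    · intro e' h1 h2
      refine ih2 e' ?_ h2
      rcases (by omega : e' = e ∨ e + 1 ≤ e') with rfl | h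
      · rw [← hveq] at h2; omega
      · exact h
  | case2 v e hv hge =>
    intro hveq he
    rw [climb, dif_neg hge]
    have key : ∀ e', e ≤ e' → a ^ e'.toNat = n → e' = e := by
      intro e' h1 h2
      have hle : a ^ e'.toNat ≤ a ^ e.toNat := by rw [h2, ← hveq]; omega
      have := (pow_le_pow_iff_right₀ (by omega : 1 < a)).mp hle
      omega
    constructor
    · constructor
      · intro h; exact ⟨e, le_refl _, hveq ▸ h⟩
      · rintro ⟨e', h1, h2⟩
        have := key e' h1 h2
        subst this
        rw [hveq, h2]
    · intro e' h1 h2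
      have := key e' h1 h2
      subst this
      exact ⟨rfl, by rw [hveq, h2]⟩

theorem bScan_spec (n : Int) (tau : List Int) :
    ∀ (a best : Int) (ha : 2 ≤ a),
      MinSpec (fun c => ∃ a', a ≤ a' ∧ a' * a' ≤ n ∧ (DivCand n tau a' c ∨ PowCand n a' c))
        best (bScan n tau a best ha) := by
  intro a best ha
  induction a, best, ha using bScan.induct (n := n) (tau := tau) with
  | case1 a best ha hsq best1 ih =>
    have hv : (1:Int) ≤ a * a := by nlinarith
    have hdef : best1 =
        (if PySem.Int.mod n a = 0 then
          (if (climb a n (a * a) 2 ha hv).1 = n then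
            (if max a (climb a n (a * a) 2 ha hv).2 <
                (if Int.gcd a (PySem.Int.floordiv n a) = 1 then
                  (if max (PySem.List.pyGetD tau a 0)
                        (PySem.List.pyGetD tau (PySem.Int.floordiv n a) 0) < best then
                    max (PySem.List.pyGetD tau a 0)
                        (PySem.List.pyGetD tau (PySem.Int.floordiv n a) 0)
                  else best)
                else best) then
              max a (climb a n (a * a) 2 ha hv).2
            else
              (if Int.gcd a (PySem.Int.floordiv n a) = 1 then
                (if max (PySem.List.pyGetD tau a 0)
                      (PySem.List.pyGetD tau (PySem.Int.floordiv n a) 0) < best then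
                  max (PySem.List.pyGetD tau a 0)
                      (PySem.List.pyGetD tau (PySem.Int.floordiv n a) 0)
                else best)
              else best))
          else
            (if Int.gcd a (PySem.Int.floordiv n a) = 1 then
              (if max (PySem.List.pyGetD tau a 0)
                    (PySem.List.pyGetD tau (PySem.Int.floordiv n a) 0) < best then
                max (PySem.List.pyGetD tau a 0)
                    (PySem.List.pyGetD tau (PySem.Int.floordiv n a) 0)
              else best)
            else best))
        else best) := rfl
    have hclimb := climb_spec a n ha (a * a) 2 hv
      (by rw [show ((2:Int)).toNat = 2 from rfl, pow_two]) (by omega)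
    have hpow : ∀ _ : (climb a n (a * a) 2 ha hv).1 = n,
        PowCand n a (max a (climb a n (a * a) 2 ha hv).2) := by
      intro hhit
      rcases hclimb.1.mp hhit with ⟨e', he2, hen⟩
      obtain ⟨hv2, _⟩ := hclimb.2 e' he2 hen
      exact ⟨e', he2, hen, by rw [hv2]⟩
    -- S-facts about best1
    have S2 : best1 ≤ best := by
      rw [hdef]; split_ifs <;> omega
    have S1 : best1 = best ∨ DivCand n tau a best1 ∨ PowCand n a best1 := by
      rw [hdef]
      split_ifs <;>
        first
          | exact Or.inl rfl
          | exact Or.inr (Or.inr (hpow (by assumption)))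
          | exact Or.inr (Or.inl ⟨by assumption, by assumption, rfl⟩)
    have S3 : ∀ c, DivCand n tau a c ∨ PowCand n a c → best1 ≤ c := by
      rintro c (⟨hmod, hgcd, rfl⟩ | ⟨e, he2, hen, rfl⟩)
      · rw [hdef, if_pos hmod]
        split_ifs <;> omega
      · have hmod : PySem.Int.mod n a = 0 := by
          rw [PySem.Int.mod_eq_zero_iff_dvd]
          exact hen ▸ dvd_pow_self a (by omega)
        obtain ⟨hv2, hhit⟩ := hclimb.2 e he2 hen
        rw [hdef, if_pos hmod, if_pos hhit, hv2]
        split_ifs <;> omega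
    -- combine with the tail of the scan
    rw [bScan, dif_pos hsq]
    show MinSpec _ best (bScan n tau (a + 1) best1 (by omega))
    refine ⟨?_, ih.2.1.trans S2, ?_⟩
    · rcases ih.1 with h0 | ⟨a', h1, h2, h3⟩
      · rcases S1 with h' | h'
        · exact Or.inl (h0.trans h')
        · exact Or.inr ⟨a, le_refl a, hsq, by rw [h0]; exact h'⟩
      · exact Or.inr ⟨a', by omega, h2, h3⟩
    · rintro c ⟨a', h1, h2, h3⟩
      rcases (by omega : a' = a ∨ a + 1 ≤ a') with rfl | h
      · exact ih.2.1.trans (S3 c h3)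
      · exact ih.2.2 c ⟨a', h, h2, h3⟩
  | case2 a best ha hsq =>
    rw [bScan, dif_neg hsq]
    refine ⟨Or.inl rfl, le_refl _, ?_⟩
    rintro c ⟨a', h1, h2, _⟩
    nlinarith

theorem minSpec_comp {C₁ C₂ : Int → Prop} {init R₁ R₂ : Int}
    (h₁ : MinSpec C₁ init R₁) (h₂ : MinSpec C₂ R₁ R₂) :
    MinSpec (fun c => C₁ c ∨ C₂ c) init R₂ := by
  refine ⟨?_, h₂.2.1.trans h₁.2.1, ?_⟩
  · rcases h₂.1 with h0 | hc
    · rcases h₁.1 with h0' | hc'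
      · exact Or.inl (h0.trans h0')
      · exact Or.inr (Or.inl (h0 ▸ hc'))
    · exact Or.inr (Or.inr hc)
  · rintro c (hc | hc)
    · exact h₂.2.1.trans (h₁.2.2 c hc)
    · exact h₂.2.2 c hc

theorem isqrt_le_iff (n a : Int) (hn : 0 ≤ n) (ha : 0 ≤ a) :
    a ≤ (Nat.sqrt n.toNat : Int) ↔ a * a ≤ n := by
  obtain ⟨m, rfl⟩ := Int.eq_ofNat_of_zero_le ha
  obtain ⟨k, rfl⟩ := Int.eq_ofNat_of_zero_le hn
  rw [show ((k : Int)).toNat = k from rfl]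
  exact_mod_cast Nat.le_sqrt

theorem stepA_best_spec (n : Int) (tau : List Int) (hn : 2 ≤ n) :
    MinSpec (Cand n tau) n
      ((PySem.List.pyRange 2 ((Nat.sqrt n.toNat : Int) + 1) 1).foldl
        (fun best a =>
          if PySem.Int.mod n a ≠ 0 then best
          else
            let b := PySem.Int.floordiv n a
            if Int.gcd a b ≠ 1 then best
            else min best (max (PySem.List.pyGetD tau a 0) (PySem.List.pyGetD tau b 0)))
        (power_cost n)) := by
  have hfold := foldl_min_spec (fun a c => DivCand n tau a c)
      (PySem.List.pyRange 2 ((Nat.sqrt n.toNat : Int) + 1) 1)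
      (fun best a =>
        if PySem.Int.mod n a ≠ 0 then best
        else
          let b := PySem.Int.floordiv n a
          if Int.gcd a b ≠ 1 then best
          else min best (max (PySem.List.pyGetD tau a 0) (PySem.List.pyGetD tau b 0)))
      (by
        intro best a hmem
        by_cases h1 : PySem.Int.mod n a = 0
        · simp only [h1, ne_eq, not_true_eq_false, if_false]
          by_cases h2 : Int.gcd a (PySem.Int.floordiv n a) = 1
          · simp only [h2, not_true_eq_false, if_false]
            refine ⟨?_, min_le_left _ _, ?_⟩
            · rcases min_choice best (max (PySem.List.pyGetD tau a 0)
                  (PySem.List.pyGetD tau (PySem.Int.floordiv n a) 0)) with h | h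
              · exact Or.inl h
              · exact Or.inr ⟨_, ⟨h1, h2, rfl⟩, h⟩
            · rintro c ⟨_, _, rfl⟩
              exact min_le_right _ _
          · simp only [h2, not_false_eq_true, if_true]
            exact ⟨Or.inl trivial, le_refl _, fun c hc => absurd hc.2.1 h2⟩
        · simp only [ne_eq, h1, not_false_eq_true, if_true]
          exact ⟨Or.inl trivial, le_refl _, fun c hc => absurd hc.1 h1⟩)
      (power_cost n)
  have hcomb := minSpec_comp (power_cost_spec n hn) hfold
  refine minSpec_congr (fun c => ?_) hcomb
  constructor
  · rintro (⟨a, b, ha2, hb2, hab, rfl⟩ | ⟨a, hmem, hdiv⟩)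
    · refine ⟨a, ha2, ?_, Or.inr ⟨b, hb2, hab, rfl⟩⟩
      calc a * a = a ^ 2 := (pow_two a).symm
        _ ≤ a ^ b.toNat := pow_le_pow_right₀ (by omega) (by omega)
        _ = n := hab
    · obtain ⟨ha2, halt⟩ := PySem.List.mem_pyRange_one.mp hmem
      refine ⟨a, ha2, ?_, Or.inl hdiv⟩
      exact (isqrt_le_iff n a (by omega) (by omega)).mp (by omega)
  · rintro ⟨a, ha2, hsq, hdiv | hpow⟩
    · refine Or.inr ⟨a, ?_, hdiv⟩
      rw [PySem.List.mem_pyRange_one]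
      have := (isqrt_le_iff n a (by omega) (by omega)).mpr hsq
      omega
    · obtain ⟨e, he2, hen, rfl⟩ := hpow
      exact Or.inl ⟨a, e, ha2, he2, hen, rfl⟩

theorem step_eq (tau : List Int) (n : Int) (hn : 2 ≤ n) : tauStepA tau n = tauStepB tau n := by
  unfold tauStepA tauStepB
  exact congrArg (PySem.List.pySetD tau n)
    (minSpec_unique (stepA_best_spec n tau hn) (bScan_spec n tau 2 n (by norm_num)))

-- ===== VERDICT (by name: the statement is the Claim_ definition above) =====
theorem tau_up_to_spec : Claim_equal_tau_up_to := by
  intro limit _ _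
  unfold Spec_tau_up_to tau_up_to tau_up_to_alt
  exact PySem.List.foldl_congr_mem _ _ _ _ (fun acc x hx =>
    step_eq acc x (PySem.List.mem_pyRange_one.mp hx).1)
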